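-- pv_equiv track=rewrite | github.com/tristanang/comp211 | finalfuck.py | interpret_code
-- ===== SOURCE A (Python) =====
-- def interpret_code(code_dict, bcode):
--     string = ''
--     i = 0
--     #j = 1
--     for j in range(len(bcode)):
--             k = bcode[i:j]
--             if k in code_dict:
--                    string += code_dict[k]
--                    #.keys()[code_dict.values().index(k)]
--                    i = j
--     return string
-- ===== SOURCE B (Python) =====
-- def interpret_code(code_dict, bcode):
--     # Precompute the set of all prefixes of the code keys; then a single
--     # forward walk keeps the current window, emits on first (shortest) match,
--     # and stops as soon as the window can no longer extend to any key.
--     prefixes = set()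
--     for key in code_dict:
--         for L in range(len(key) + 1):
--             prefixes.add(key[:L])
--     out = []
--     w = ''
--     for c in bcode:
--         if w in code_dict:
--             out.append(code_dict[w])
--             w = ''
--         w += c
--         if w not in prefixes:
--             break
--     return ''.join(out)
-- ===== Notes on version B (the rewrite author's own statement) =====
-- stated objective: faster
-- what changed: Replaces the index-pair loop that re-slices bcode[i:j] at every position with a precomputed prefix set of the code keys and a single forward walk that grows the current window one char at a time, emits on the first match, and breaks as soon as the window is no prefix of any key.
import Mathlib
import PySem

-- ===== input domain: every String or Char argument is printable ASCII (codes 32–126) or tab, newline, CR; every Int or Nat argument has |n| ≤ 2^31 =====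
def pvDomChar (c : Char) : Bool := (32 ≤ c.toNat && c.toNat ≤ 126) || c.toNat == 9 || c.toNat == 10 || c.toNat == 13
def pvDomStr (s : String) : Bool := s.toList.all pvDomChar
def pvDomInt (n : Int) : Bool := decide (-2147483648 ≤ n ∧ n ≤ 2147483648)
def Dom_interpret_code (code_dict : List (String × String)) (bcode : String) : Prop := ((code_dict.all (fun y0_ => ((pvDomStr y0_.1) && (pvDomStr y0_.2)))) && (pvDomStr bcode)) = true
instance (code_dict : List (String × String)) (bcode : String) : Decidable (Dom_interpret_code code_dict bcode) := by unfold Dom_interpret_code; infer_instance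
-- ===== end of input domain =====

-- B replaces A's quadratic re-slicing index loop by a precomputed prefix set of the keys
-- and a single forward walk with early stop (objective: faster).


-- ===== PORT A =====
-- literal transliteration of A: for j in range(len(bcode)): k = bcode[i:j];
-- if k in code_dict: string += code_dict[k]; i = j   (the string is built on the List Char side)
def interpret_code (code_dict : List (String × String)) (bcode : String) : String :=
  let d := PySem.Dict.ofList code_dict
  let cs := bcode.toList
  let r := (PySem.List.pyRange 0 (cs.length : Int) 1).foldl
    (fun (st : List Char × Int) j =>
      let k := String.ofList (PySem.List.slice cs (some st.2) (some j))
      if d.contains k then (st.1 ++ (d.getD k "").toList, j) else st)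
    ([], 0)
  String.ofList r.1

-- ===== PORT B =====
-- all prefixes key[:L], L in range(len(key)+1), of every key of the dict
def icPrefixes (keys : List String) : PySem.Set String :=
  keys.foldl (fun s key =>
    (PySem.List.pyRange 0 ((key.toList.length : Int) + 1) 1).foldl
      (fun s L => PySem.Set.add s (String.ofList (PySem.List.slice key.toList none (some L)))) s)
    PySem.Set.empty

-- the walk: check window w, emit + reset on a match, append c, break when w is no key prefix
def icWalk (d : PySem.Dict String String) (pre : PySem.Set String) :
    List Char → List Char → List Char → List Char
  | [], _, out => out
  | c :: rest, w, out =>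
    let p : List Char × List Char :=
      if d.contains (String.ofList w) then (out ++ (d.getD (String.ofList w) "").toList, [])
      else (out, w)
    let w2 := p.2 ++ [c]
    if PySem.Set.contains pre (String.ofList w2) then icWalk d pre rest w2 p.1 else p.1

def interpret_code_alt (code_dict : List (String × String)) (bcode : String) : String :=
  let d := PySem.Dict.ofList code_dict
  let pre := icPrefixes d.keys
  String.ofList (icWalk d pre bcode.toList [] [])

-- ===== PRECONDITION & SPEC =====
def Spec_interpret_code (code_dict : List (String × String)) (bcode : String) (out : String) : Prop := out = interpret_code_alt code_dict bcode
instance (code_dict : List (String × String)) (bcode : String) (out : String) : Decidable (Spec_interpret_code code_dict bcode out) := by unfold Spec_interpret_code; infer_instance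

-- ===== CLAIM (what is proved, stated in full; the proofs are below) =====
def Claim_equal_interpret_code : Prop := ∀ (code_dict : List (String × String)) (bcode : String), Dom_interpret_code code_dict bcode → Spec_interpret_code code_dict bcode (interpret_code code_dict bcode)

-- ===== LEMMAS AND PROOFS =====

-- reference recursion both ports are reduced to: one window check per consumed char
def icF (d : PySem.Dict String String) : List Char → List Char → List Char
  | [], _ => []
  | c :: rest, w =>
    (if d.contains (String.ofList w) then (d.getD (String.ofList w) "").toList else []) ++
    icF d rest ((if d.contains (String.ofList w) then [] else w) ++ [c])

-- membership in a fold of Set.add over a list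
lemma mem_foldl_set_add {α β : Type} [BEq α] [LawfulBEq α] (f : β → α)
    (xs : List β) (s0 : PySem.Set α) (x : α) :
    x ∈ xs.foldl (fun s b => PySem.Set.add s (f b)) s0 ↔ x ∈ s0 ∨ ∃ b ∈ xs, x = f b := by
  induction xs generalizing s0 with
  | nil => simp
  | cons y ys ih =>
    simp [List.foldl_cons, ih, PySem.Set.mem_add]
    tauto

-- the slices key[:L], L in range(len(key)+1), are exactly the prefixes of key
lemma exists_slice_iff_prefix (k : String) (w : List Char) :
    (∃ L ∈ PySem.List.pyRange 0 ((k.toList.length : Int) + 1) 1,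
      String.ofList w = String.ofList (PySem.List.slice k.toList none (some L)))
    ↔ w <+: k.toList := by
  constructor
  · rintro ⟨L, hL, he⟩
    rw [PySem.List.mem_pyRange_one] at hL
    rw [PySem.List.slice_to _ hL.1, String.ofList_inj] at he
    exact he ▸ List.take_prefix _ _
  · intro h
    refine ⟨(w.length : Int), ?_, ?_⟩
    · rw [PySem.List.mem_pyRange_one]
      have := h.length_le
      constructor <;> [positivity; exact_mod_cast Nat.lt_succ_of_le this]
    · rw [PySem.List.slice_to _ (by positivity), String.ofList_inj, Int.toNat_natCast]
      exact List.prefix_iff_eq_take.mp h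

-- what icPrefixes contains: exactly the prefixes of the keys
lemma mem_icPrefixes (keys : List String) (w : List Char) :
    String.ofList w ∈ icPrefixes keys ↔ ∃ k ∈ keys, w <+: k.toList := by
  unfold icPrefixes
  suffices h : ∀ s0 : PySem.Set String,
      String.ofList w ∈ keys.foldl (fun s key =>
        (PySem.List.pyRange 0 ((key.toList.length : Int) + 1) 1).foldl
          (fun s L => PySem.Set.add s (String.ofList (PySem.List.slice key.toList none (some L)))) s) s0
      ↔ String.ofList w ∈ s0 ∨ ∃ k ∈ keys, w <+: k.toList by
    rw [h PySem.Set.empty]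
    simp [PySem.Set.empty]
  induction keys with
  | nil => simp
  | cons k ks ih =>
    intro s0
    rw [List.foldl_cons, ih, mem_foldl_set_add]
    simp only [exists_slice_iff_prefix, List.mem_cons]
    constructor
    · rintro (( h | h) | ⟨k', hk', hp⟩)
      · exact Or.inl h
      · exact Or.inr ⟨k, Or.inl rfl, h⟩
      · exact Or.inr ⟨k', Or.inr hk', hp⟩
    · rintro (h | ⟨k', (rfl | hk'), hp⟩)
      · exact Or.inl (Or.inl h)
      · exact Or.inl (Or.inr hp)
      · exact Or.inr ⟨k', hk', hp⟩

-- a window that is no prefix of any key never matches again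
lemma icF_eq_nil (d : PySem.Dict String String) (rest w : List Char)
    (h : ∀ z : List Char, w <+: z → d.contains (String.ofList z) = false) :
    icF d rest w = [] := by
  induction rest generalizing w with
  | nil => rfl
  | cons c cs ih =>
    have hw : d.contains (String.ofList w) = false := h w (List.prefix_refl w)
    simp only [icF, hw, Bool.false_eq_true, if_false, List.nil_append]
    exact ih (w ++ [c]) (fun z hz => h z ((List.prefix_append w [c]).trans hz))

-- B's walk computes icF: the break is sound
lemma icWalk_eq (d : PySem.Dict String String) (rest w out : List Char) :
    icWalk d (icPrefixes d.keys) rest w out = out ++ icF d rest w := by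
  induction rest generalizing w out with
  | nil => simp [icWalk, icF]
  | cons c cs ih =>
    simp only [icWalk, icF]
    by_cases hd : d.contains (String.ofList w)
    · simp only [hd, if_pos]
      by_cases hp : PySem.Set.contains (icPrefixes d.keys) (String.ofList ([] ++ [c]))
      · rw [if_pos hp, ih]
        simp
      · rw [if_neg hp]
        rw [icF_eq_nil d cs ([] ++ [c]) ?_, List.append_nil]
        intro z hz
        by_contra hc
        apply hp
        rw [PySem.Set.contains_iff _ _, mem_icPrefixes]
        refine ⟨String.ofList z, ?_, by simpa using hz⟩
        rw [← PySem.Dict.contains_iff_mem_keys]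
        simpa using hc
    · simp only [hd, Bool.false_eq_true, if_false]
      by_cases hp : PySem.Set.contains (icPrefixes d.keys) (String.ofList (w ++ [c]))
      · rw [if_pos hp, ih, List.nil_append]
      · rw [if_neg hp, List.nil_append]
        rw [icF_eq_nil d cs (w ++ [c]) ?_, List.append_nil]
        intro z hz
        by_contra hc
        apply hp
        rw [PySem.Set.contains_iff _ _, mem_icPrefixes]
        refine ⟨String.ofList z, ?_, by simpa using hz⟩
        rw [← PySem.Dict.contains_iff_mem_keys]
        simpa using hc

-- A's loop computes icF: the pair (string, i) unrolls to the window cs[i:t]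
lemma icA_loop (d : PySem.Dict String String) (cs : List Char) (i t : Nat)
    (hit : i ≤ t) (htn : t ≤ cs.length) (acc : List Char) :
    ((PySem.List.pyRange (t : Int) (cs.length : Int) 1).foldl
      (fun (st : List Char × Int) j =>
        if d.contains (String.ofList (PySem.List.slice cs (some st.2) (some j))) then
          (st.1 ++ (d.getD (String.ofList (PySem.List.slice cs (some st.2) (some j))) "").toList, j)
        else st)
      (acc, (i : Int))).1
    = acc ++ icF d (cs.drop t) ((cs.drop i).take (t - i)) := by
  induction hm : cs.length - t generalizing t i acc with
  | zero =>
    have ht : t = cs.length := by omega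
    subst ht
    rw [PySem.List.pyRange_one_eq_nil (le_refl _), List.foldl_nil, List.drop_length]
    simp [icF]
  | succ m ih =>
    have htlt : t < cs.length := by omega
    rw [PySem.List.pyRange_one_cons (by exact_mod_cast htlt), List.foldl_cons]
    have hcast : ((t : Int) + 1) = ((t + 1 : Nat) : Int) := by push_cast; ring
    have hsl : PySem.List.slice cs (some (i : Int)) (some (t : Int))
        = (cs.drop i).take (t - i) := PySem.List.slice_natCast cs i t
    have hdrop : cs.drop t = cs[t] :: cs.drop (t + 1) := List.drop_eq_getElem_cons htlt
    by_cases hd : d.contains (String.ofList ((cs.drop i).take (t - i)))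
    · simp only [hsl, hd, if_pos]
      rw [hcast, ih t (t + 1) (by omega) (by omega) _ (by omega), hdrop]
      simp only [icF, hd, if_pos, List.nil_append,
        show t + 1 - t = 1 from by omega, List.take_succ_cons, List.take_zero,
        List.append_assoc]
    · simp only [hsl, hd, Bool.false_eq_true, if_false]
      rw [hcast, ih i (t + 1) (by omega) (by omega) _ (by omega), hdrop]
      simp only [icF, hd, Bool.false_eq_true, if_false, List.nil_append]
      rw [show t + 1 - i = (t - i) + 1 from by omega, List.take_add_one, List.getElem?_drop,
        show i + (t - i) = t from by omega, List.getElem?_eq_getElem htlt]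
      simp

-- ===== VERDICT (by name: the statement is the Claim_ definition above) =====
theorem interpret_code_spec : Claim_equal_interpret_code := by
  intro code_dict bcode _
  unfold Spec_interpret_code
  simp only [interpret_code, interpret_code_alt]
  rw [icWalk_eq]
  have h := icA_loop (PySem.Dict.ofList code_dict) bcode.toList 0 0 (le_refl 0)
    (Nat.zero_le _) []
  simp only [Nat.cast_zero, List.drop_zero, Nat.sub_zero, List.take_zero,
    List.nil_append] at h ⊢
  rw [h]
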